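-- pv_equiv track=rewrite | github.com/jameshalgren/t-route | src/python_framework_v02/nhd_network.py | separate_waterbodies
-- ===== SOURCE A (Python) =====
-- from collections import defaultdict, Counter, deque
--
-- def reverse_surjective_mapping(d):
--     rd = defaultdict(list)
--     for src, dst in d.items():
--         rd[dst].append(src)
--     rd.default_factory = None
--     return rd
--
-- def separate_waterbodies(connections, waterbodies):
--     waterbody_nodes = {}
--     for wb, nodes in reverse_surjective_mapping(waterbodies).items():
--         waterbody_nodes[wb] = net = {}
--         for n in nodes:
--             if n in connections:
--                 net[n] = list(filter(waterbodies.__contains__, connections[n]))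
--     return waterbody_nodes
-- ===== SOURCE B (Python) =====
-- def separate_waterbodies(connections, waterbodies):
--     # Staged nested-scan approach: list the distinct waterbody ids first (in
--     # first-occurrence order), then build each subnetwork by rescanning
--     # waterbodies.items() for that id -- no reverse index is ever built.
--     order = list(dict.fromkeys(waterbodies.values()))
--     return {
--         wb: {
--             n: [m for m in connections[n] if m in waterbodies]
--             for n, w in waterbodies.items()
--             if w == wb and n in connections
--         }
--         for wb in order
--     }
-- ===== Notes on version B (the rewrite author's own statement) =====
-- stated objective: alternative
-- what changed: B builds no reverse index at all: it first lists the distinct waterbody ids in first-occurrence order (dict.fromkeys) and then rescans waterbodies.items() once per id to build that id's subnetwork (staged nested scans instead of a grouped multimap).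
import Mathlib
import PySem

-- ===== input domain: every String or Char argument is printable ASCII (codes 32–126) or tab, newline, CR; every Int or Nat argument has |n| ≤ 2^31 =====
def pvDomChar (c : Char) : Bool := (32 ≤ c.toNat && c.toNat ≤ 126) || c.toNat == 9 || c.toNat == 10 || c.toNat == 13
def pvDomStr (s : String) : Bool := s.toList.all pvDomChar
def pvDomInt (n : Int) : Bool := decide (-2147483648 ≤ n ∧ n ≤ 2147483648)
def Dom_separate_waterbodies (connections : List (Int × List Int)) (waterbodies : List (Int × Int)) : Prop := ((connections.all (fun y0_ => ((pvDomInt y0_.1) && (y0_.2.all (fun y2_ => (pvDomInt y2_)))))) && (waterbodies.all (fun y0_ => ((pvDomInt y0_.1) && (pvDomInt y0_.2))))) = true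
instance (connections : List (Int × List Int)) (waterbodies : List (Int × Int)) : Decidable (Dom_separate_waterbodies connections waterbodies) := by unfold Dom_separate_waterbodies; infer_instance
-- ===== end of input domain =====

-- B builds no reverse index: it lists the distinct waterbody ids first and rescans
-- waterbodies.items() once per id (objective: alternative — staged nested scans, not faster).

-- shared transliterations of the Python expressions 'n in connections' and
-- 'list(filter(waterbodies.__contains__, connections[n]))' / '[m for m in connections[n] if m in waterbodies]'
def pvHasKey (connections : List (Int × List Int)) (n : Int) : Bool :=
  connections.any (fun p => p.1 == n)
def pvFilt (connections : List (Int × List Int)) (waterbodies : List (Int × Int)) (n : Int) : List Int :=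
  (((connections.find? (fun p => p.1 == n)).map (·.2)).getD []).filter
    (fun m => waterbodies.any (fun q => q.1 == m))

-- ===== PORT A =====
-- reverse_surjective_mapping: rd[dst].append(src) over d.items()
def pvRevMap (waterbodies : List (Int × Int)) : PySem.Dict Int (List Int) :=
  waterbodies.foldl (fun rd p => rd.modify p.2 [] (fun xs => xs ++ [p.1])) PySem.Dict.empty

-- inner loop: 'for n in nodes: if n in connections: net[n] = …'
def pvNetA (connections : List (Int × List Int)) (waterbodies : List (Int × Int))
    (nodes : List Int) : PySem.Dict Int (List Int) :=
  nodes.foldl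
    (fun net n => if pvHasKey connections n then net.insert n (pvFilt connections waterbodies n) else net)
    PySem.Dict.empty

def separate_waterbodies (connections : List (Int × List Int)) (waterbodies : List (Int × Int)) :
    List (Int × List (Int × List Int)) :=
  (((pvRevMap waterbodies).items.foldl
      (fun acc q => acc.insert q.1 (pvNetA connections waterbodies q.2))
      (PySem.Dict.empty : PySem.Dict Int (PySem.Dict Int (List Int)))).items).map
    (fun q => (q.1, q.2.items))

-- ===== PORT B =====
-- inner dict comprehension: '{n: … for n, w in waterbodies.items() if w == wb and n in connections}'
def pvNetB (connections : List (Int × List Int)) (waterbodies : List (Int × Int)) (wb : Int) :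
    List (Int × List Int) :=
  (waterbodies.foldl
      (fun net p => if p.2 == wb && pvHasKey connections p.1
                    then net.insert p.1 (pvFilt connections waterbodies p.1) else net)
      (PySem.Dict.empty : PySem.Dict Int (List Int))).items

-- 'order = list(dict.fromkeys(waterbodies.values()))' then the outer dict comprehension over
-- order (its keys are distinct by construction, so the resulting dict is the list of pairs in order)
def separate_waterbodies_alt (connections : List (Int × List Int)) (waterbodies : List (Int × Int)) :
    List (Int × List (Int × List Int)) :=
  (PySem.List.dedup (waterbodies.map (·.2))).map
    (fun wb => (wb, pvNetB connections waterbodies wb))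

-- ===== PRECONDITION & SPEC =====
def Spec_separate_waterbodies (connections : List (Int × List Int)) (waterbodies : List (Int × Int)) (out : List (Int × List (Int × List Int))) : Prop := out = separate_waterbodies_alt connections waterbodies
instance (connections : List (Int × List Int)) (waterbodies : List (Int × Int)) (out : List (Int × List (Int × List Int))) : Decidable (Spec_separate_waterbodies connections waterbodies out) := by unfold Spec_separate_waterbodies; infer_instance

-- ===== CLAIM =====
def Claim_equal_separate_waterbodies : Prop := ∀ (connections : List (Int × List Int)) (waterbodies : List (Int × Int)), Dom_separate_waterbodies connections waterbodies → Spec_separate_waterbodies connections waterbodies (separate_waterbodies connections waterbodies)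

-- ===== LEMMAS AND PROOFS =====

theorem pv_revmap_nodup (l : List (Int × Int)) : (pvRevMap l).keys.Nodup := by
  exact PySem.Dict.nodup_keys_foldl_modify_key l (fun p => p.2) [] (fun _ p => (fun xs => xs ++ [p.1])) _ (by simp)

theorem pv_revmap_keys (w : List (Int × Int)) :
    (pvRevMap w).keys = PySem.List.dedup (w.map (·.2)) := by
  have := PySem.Dict.keys_foldl_modify_key (l := w) (key := fun p => p.2) (d0 := ([] : List Int))
    (f := fun _ p => (fun xs => xs ++ [p.1])) (d := PySem.Dict.empty)
  simpa [pvRevMap, PySem.Set.update, PySem.Set.ofList, PySem.List.dedup_eq_ofList] using this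

theorem pv_revmap_getD (w : List (Int × Int)) (k : Int) :
    (pvRevMap w).getD k [] = (w.filter (fun p => p.2 == k)).map (·.1) := by
  have h : pvRevMap w
      = (w.map Prod.swap).foldl (fun d p => d.modify p.1 [] (fun xs => xs ++ [p.2])) PySem.Dict.empty := by
    rw [List.foldl_map]; rfl
  rw [h, PySem.Dict.getD_foldl_modify_append, List.filter_map, List.map_map]
  simp [Function.comp_def]

-- the two inner loops build the same dict: A folds the conditional insert over the
-- reverse-mapped node list, B folds it over waterbodies filtered for this wb
theorem pv_net_eq (c : List (Int × List Int)) (w : List (Int × Int)) (k : Int) :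
    pvNetB c w k = (pvNetA c w ((w.filter (fun p => p.2 == k)).map (·.1))).items := by
  unfold pvNetA pvNetB
  rw [List.foldl_map, List.foldl_filter]
  have hfun : (fun (net : PySem.Dict Int (List Int)) (p : Int × Int) =>
        if p.2 == k && pvHasKey c p.1 then net.insert p.1 (pvFilt c w p.1) else net)
      = (fun net p => if p.2 == k
          then (if pvHasKey c p.1 then net.insert p.1 (pvFilt c w p.1) else net) else net) := by
    funext net p
    by_cases h1 : (p.2 == k) = true <;> simp [h1]
  rw [hfun]

theorem pv_afold_items (c : List (Int × List Int)) (w : List (Int × Int)) :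
    ((pvRevMap w).items.foldl
        (fun acc q => acc.insert q.1 (pvNetA c w q.2))
        (PySem.Dict.empty : PySem.Dict Int (PySem.Dict Int (List Int)))).items
      = (pvRevMap w).items.map (fun q => (q.1, pvNetA c w q.2)) := by
  have := PySem.Dict.items_foldl_insert_fresh (l := (pvRevMap w).items) (k := Prod.fst)
    (v := fun q => pvNetA c w q.2)
    (d := (PySem.Dict.empty : PySem.Dict Int (PySem.Dict Int (List Int))))
    (by simp) (by simpa [PySem.Dict.keys] using pv_revmap_nodup w)
  simpa using this

-- ===== VERDICT =====
theorem separate_waterbodies_spec : Claim_equal_separate_waterbodies := by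
  intro c w _
  unfold Spec_separate_waterbodies separate_waterbodies separate_waterbodies_alt
  rw [pv_afold_items, List.map_map,
      PySem.Dict.items_eq_map_keys (pvRevMap w) (pv_revmap_nodup w) ([] : List Int),
      List.map_map, ← pv_revmap_keys]
  apply List.map_congr_left
  intro k _
  simp only [Function.comp_def]
  rw [pv_revmap_getD, pv_net_eq]
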